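-- pv_equiv track=rewrite | github.com/Laurens-GitHub/Data-Structures-Algorithms | Array Sequences/Other/snake_game.py | findPassableLanes
-- ===== SOURCE A (Python) =====
-- def findPassableLanes(board):
--     rows = len(board)
--     cols = len(board[0])
--     result = [[],[]]
--
--     for r in range(rows):
--         is_wall_there = False
--         for c in range(cols):
--             if board[r][c] == "+":
--                 is_wall_there = True
--                 break
--         if not is_wall_there:
--             result[0].append(r)
--
--
--     for c in range(cols):
--         is_wall_there = False
--         for r in range(rows):
--             if board[r][c] == "+":
--                 is_wall_there = True
--                 break
--         if not is_wall_there: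
--             result[1].append(c)
--
--
--     return result
-- ===== SOURCE B (Python) =====
-- def findPassableLanes(board):
--     rows = len(board)
--     cols = len(board[0])
--     wall_rows = set()
--     wall_cols = set()
--     for r in range(rows):
--         for c in range(cols):
--             if board[r][c] == "+":
--                 wall_rows.add(r)
--                 wall_cols.add(c)
--     return [[r for r in range(rows) if r not in wall_rows],
--             [c for c in range(cols) if c not in wall_cols]]
-- ===== Notes on version B (the rewrite author's own statement) =====
-- stated objective: faster
-- what changed: Replaces A's two separate break-on-first-wall scans (row pass plus a column pass that rescans the grid column-by-column) by one single row-major pass recording wall rows and wall columns in two sets, then filtering the two ranges.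
-- outside the precondition, e.g. on findPassableLanes([['+', '+'], ['+']]): A returns [[], []], B raises IndexError
import Mathlib
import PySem

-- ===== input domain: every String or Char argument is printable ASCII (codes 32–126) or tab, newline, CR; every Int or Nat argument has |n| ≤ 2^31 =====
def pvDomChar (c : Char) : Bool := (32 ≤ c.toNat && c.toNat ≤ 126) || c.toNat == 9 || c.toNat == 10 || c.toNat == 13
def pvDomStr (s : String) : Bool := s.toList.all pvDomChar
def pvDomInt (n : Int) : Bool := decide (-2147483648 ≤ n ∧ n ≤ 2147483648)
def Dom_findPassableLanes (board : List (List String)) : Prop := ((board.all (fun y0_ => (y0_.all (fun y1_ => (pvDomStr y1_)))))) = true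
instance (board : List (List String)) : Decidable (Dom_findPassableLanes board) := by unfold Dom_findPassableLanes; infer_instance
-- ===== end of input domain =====

-- B replaces A's two break-on-first-wall grid rescans by one single row-major pass collecting wall rows/columns into two sets (measured faster: no cache-unfriendly column rescan).

-- ===== PORT A =====
-- board[r][c]; in-range under Pre_, so the defaults are never reached there
def pvCell (board : List (List String)) (r c : Int) : String :=
  PySem.List.pyGetD (PySem.List.pyGetD board r []) c ""

def findPassableLanes (board : List (List String)) : List (List Int) :=
  let rows : Int := board.length
  let cols : Int := (board.headD []).length
  -- first loop: for r in range(rows), inner break-loop = any '+' among c in range(cols)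
  let res0 := (PySem.List.pyRange 0 rows 1).foldl
    (fun acc r => if (PySem.List.pyRange 0 cols 1).any (fun c => pvCell board r c == "+") then acc else acc ++ [r]) []
  -- second loop: for c in range(cols), inner break-loop over r in range(rows)
  let res1 := (PySem.List.pyRange 0 cols 1).foldl
    (fun acc c => if (PySem.List.pyRange 0 rows 1).any (fun r => pvCell board r c == "+") then acc else acc ++ [c]) []
  [res0, res1]

-- ===== PORT B =====
-- single pass: collect the wall rows and wall columns into two sets
def pvMarkWalls (board : List (List String)) (rows cols : Int) : PySem.Set Int × PySem.Set Int :=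
  (PySem.List.pyRange 0 rows 1).foldl (fun st r =>
    (PySem.List.pyRange 0 cols 1).foldl (fun st c =>
      if pvCell board r c == "+" then (PySem.Set.add st.1 r, PySem.Set.add st.2 c) else st) st)
    (PySem.Set.empty, PySem.Set.empty)

def findPassableLanes_alt (board : List (List String)) : List (List Int) :=
  let rows : Int := board.length
  let cols : Int := (board.headD []).length
  let st := pvMarkWalls board rows cols
  [ (PySem.List.pyRange 0 rows 1).filter (fun r => !(PySem.Set.contains st.1 r)),
    (PySem.List.pyRange 0 cols 1).filter (fun c => !(PySem.Set.contains st.2 c)) ]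

-- ===== PRECONDITION & SPEC =====
-- Pre_ excludes the empty board (A raises IndexError on board[0]) and ragged boards with a row
-- shorter than the first row, on which A either raises IndexError or returns a value only because
-- its break happened to fire before the short row ran out — B raises IndexError there.
def Pre_findPassableLanes (board : List (List String)) : Prop :=
  board ≠ [] ∧ ∀ row ∈ board, (board.headD []).length ≤ row.length
instance (board : List (List String)) : Decidable (Pre_findPassableLanes board) := by
  unfold Pre_findPassableLanes; infer_instance

def pvWitness_findPassableLanes : List (List String) := [["+", "."], [".", "."]]

def Spec_findPassableLanes (board : List (List String)) (out : List (List Int)) : Prop := out = findPassableLanes_alt board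
instance (board : List (List String)) (out : List (List Int)) : Decidable (Spec_findPassableLanes board out) := by unfold Spec_findPassableLanes; infer_instance

-- ===== CLAIM (what is proved, stated in full; the proofs are below) =====
def Claim_equal_findPassableLanes : Prop := ∀ (board : List (List String)), Dom_findPassableLanes board → Pre_findPassableLanes board → Spec_findPassableLanes board (findPassableLanes board)

-- ===== LEMMAS AND PROOFS =====

-- A's "if wall: skip else append" loop is a filter on the negated test
theorem pv_foldl_skip_if {a : Type} (p : a -> Bool) (l acc : List a) :
    l.foldl (fun acc x => if p x then acc else acc ++ [x]) acc
      = acc ++ l.filter (fun x => !p x) := by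
  rw [show (fun (acc : List a) x => if p x then acc else acc ++ [x])
        = (fun (acc : List a) x => if (!p x) then acc ++ [x] else acc) from by
      funext a x; by_cases h : p x <;> simp [h]]
  exact PySem.List.foldl_append_if_eq_filter _ _ _

-- inner loop of B over one row r: membership in the two accumulated sets
theorem pv_inner_mem (board : List (List String)) (r : Int) (cs : List Int)
    (st : PySem.Set Int × PySem.Set Int) (x y : Int) :
    (x ∈ (cs.foldl (fun st c =>
        if pvCell board r c == "+" then (PySem.Set.add st.1 r, PySem.Set.add st.2 c) else st) st).1
      ↔ x ∈ st.1 ∨ (x = r ∧ ∃ c ∈ cs, pvCell board r c == "+")) ∧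
    (y ∈ (cs.foldl (fun st c =>
        if pvCell board r c == "+" then (PySem.Set.add st.1 r, PySem.Set.add st.2 c) else st) st).2
      ↔ y ∈ st.2 ∨ ∃ c ∈ cs, c = y ∧ pvCell board r c == "+") := by
  induction cs generalizing st with
  | nil => simp
  | cons c cs ih =>
    simp only [List.foldl_cons]
    by_cases h : pvCell board r c == "+"
    · rw [if_pos h]
      simp only [ih, PySem.Set.mem_add]
      constructor
      · constructor
        · rintro (⟨hx | hx⟩ | ⟨hx, c', hc', hw⟩)
          · exact Or.inl hx
          · exact Or.inr ⟨hx, c, List.mem_cons_self, h⟩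
          · exact Or.inr ⟨hx, c', List.mem_cons_of_mem _ hc', hw⟩
        · rintro (hx | ⟨hx, c', hc', hw⟩)
          · exact Or.inl (Or.inl hx)
          · rcases List.mem_cons.mp hc' with rfl | hc'
            · exact Or.inl (Or.inr hx)
            · exact Or.inr ⟨hx, c', hc', hw⟩
      · constructor
        · rintro (⟨hy | hy⟩ | ⟨c', hc', hy, hw⟩)
          · exact Or.inl hy
          · exact Or.inr ⟨c, List.mem_cons_self, hy.symm, h⟩
          · exact Or.inr ⟨c', List.mem_cons_of_mem _ hc', hy, hw⟩
        · rintro (hy | ⟨c', hc', hy, hw⟩)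
          · exact Or.inl (Or.inl hy)
          · rcases List.mem_cons.mp hc' with rfl | hc'
            · exact Or.inl (Or.inr hy.symm)
            · exact Or.inr ⟨c', hc', hy, hw⟩
    · rw [if_neg h]
      simp only [ih]
      constructor
      · constructor
        · rintro (hx | ⟨hx, c', hc', hw⟩)
          · exact Or.inl hx
          · exact Or.inr ⟨hx, c', List.mem_cons_of_mem _ hc', hw⟩
        · rintro (hx | ⟨hx, c', hc', hw⟩)
          · exact Or.inl hx
          · rcases List.mem_cons.mp hc' with rfl | hc'
            · exact absurd hw h
            · exact Or.inr ⟨hx, c', hc', hw⟩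
      · constructor
        · rintro (hy | ⟨c', hc', hy, hw⟩)
          · exact Or.inl hy
          · exact Or.inr ⟨c', List.mem_cons_of_mem _ hc', hy, hw⟩
        · rintro (hy | ⟨c', hc', hy, hw⟩)
          · exact Or.inl hy
          · rcases List.mem_cons.mp hc' with rfl | hc'
            · exact absurd hw h
            · exact Or.inr ⟨c', hc', hy, hw⟩

-- outer loop of B: membership in the final wall-row / wall-column sets
theorem pv_mark_mem (board : List (List String)) (rs cs : List Int)
    (st : PySem.Set Int × PySem.Set Int) (x y : Int) :
    (x ∈ (rs.foldl (fun st r => cs.foldl (fun st c =>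
        if pvCell board r c == "+" then (PySem.Set.add st.1 r, PySem.Set.add st.2 c) else st) st) st).1
      ↔ x ∈ st.1 ∨ ∃ r ∈ rs, r = x ∧ ∃ c ∈ cs, pvCell board r c == "+") ∧
    (y ∈ (rs.foldl (fun st r => cs.foldl (fun st c =>
        if pvCell board r c == "+" then (PySem.Set.add st.1 r, PySem.Set.add st.2 c) else st) st) st).2
      ↔ y ∈ st.2 ∨ ∃ c ∈ cs, c = y ∧ ∃ r ∈ rs, pvCell board r c == "+") := by
  induction rs generalizing st with
  | nil => simp
  | cons r rs ih =>
    simp only [List.foldl_cons, ih]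
    constructor
    · rw [(pv_inner_mem board r cs st x y).1]
      constructor
      · rintro ((hx | ⟨hx, c, hc, hw⟩) | ⟨r', hr', hx, c, hc, hw⟩)
        · exact Or.inl hx
        · exact Or.inr ⟨r, List.mem_cons_self, hx.symm, c, hc, hw⟩
        · exact Or.inr ⟨r', List.mem_cons_of_mem _ hr', hx, c, hc, hw⟩
      · rintro (hx | ⟨r', hr', hx, c, hc, hw⟩)
        · exact Or.inl (Or.inl hx)
        · rcases List.mem_cons.mp hr' with rfl | hr'
          · exact Or.inl (Or.inr ⟨hx.symm, c, hc, hw⟩)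
          · exact Or.inr ⟨r', hr', hx, c, hc, hw⟩
    · rw [(pv_inner_mem board r cs st x y).2]
      constructor
      · rintro ((hy | ⟨c, hc, hy, hw⟩) | ⟨c, hc, hy, r', hr', hw⟩)
        · exact Or.inl hy
        · exact Or.inr ⟨c, hc, hy, r, List.mem_cons_self, hw⟩
        · exact Or.inr ⟨c, hc, hy, r', List.mem_cons_of_mem _ hr', hw⟩
      · rintro (hy | ⟨c, hc, hy, r', hr', hw⟩)
        · exact Or.inl (Or.inl hy)
        · rcases List.mem_cons.mp hr' with rfl | hr'
          · exact Or.inl (Or.inr ⟨c, hc, hy, hw⟩)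
          · exact Or.inr ⟨c, hc, hy, r', hr', hw⟩

-- ===== VERDICT (by name: the statement is the Claim_ definition above) =====
theorem findPassableLanes_spec : Claim_equal_findPassableLanes := by
  intro board _ _
  unfold Spec_findPassableLanes findPassableLanes findPassableLanes_alt pvMarkWalls
  dsimp only
  rw [pv_foldl_skip_if, pv_foldl_skip_if]
  simp only [List.nil_append]
  congr 1
  · apply List.filter_congr
    intro r hr
    congr 1
    rw [Bool.eq_iff_iff, PySem.Set.contains_iff, List.any_eq_true,
        (pv_mark_mem board _ _ _ r r).1]
    simp only [PySem.Set.empty, List.not_mem_nil, false_or]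
    constructor
    · rintro ⟨c, hc, hw⟩
      exact ⟨r, hr, rfl, c, hc, hw⟩
    · rintro ⟨r', _, rfl, c, hc, hw⟩
      exact ⟨c, hc, hw⟩
  congr 1
  apply List.filter_congr
  intro c hc
  congr 1
  rw [Bool.eq_iff_iff, PySem.Set.contains_iff, List.any_eq_true,
      (pv_mark_mem board _ _ _ c c).2]
  simp only [PySem.Set.empty, List.not_mem_nil, false_or]
  constructor
  · rintro ⟨r, hr, hw⟩
    exact ⟨c, hc, rfl, r, hr, hw⟩
  · rintro ⟨c', _, rfl, r, hr, hw⟩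
    exact ⟨r, hr, hw⟩
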